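-- pv_equiv track=rewrite | github.com/Vesimeu/UIR | UIR_5_Variant/UIR_laba_4/task_dop_sell.py | generate_custom_matrix
-- ===== SOURCE A (Python) =====
-- def generate_custom_matrix(rows, cols):
--     custom_matrix = [[0] * cols for _ in range(rows)]
--     count = 1
--     for i in range(cols - 1, -1, -1):
--         if i % 2 == 0:
--             for j in range(rows - 1, -1, -1):
--                 custom_matrix[j][i] = count
--                 count += 1
--         else:
--             for j in range(rows):
--                 custom_matrix[j][i] = count
--                 count += 1
--     return custom_matrix
-- ===== SOURCE B (Python) =====
-- def generate_custom_matrix(rows, cols):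
--     return [
--         [(cols - 1 - i) * rows + 1 + (rows - 1 - j if i % 2 == 0 else j)
--          for i in range(cols)]
--         for j in range(rows)
--     ]
-- ===== Notes on version B (the rewrite author's own statement) =====
-- stated objective: alternative
-- what changed: Replaced the serpentine mutation loop with a running counter by a direct closed-form per-cell value (cols-1-i)*rows + 1 + (rows-1-j or j by column parity), building the matrix with nested comprehensions and no mutation.
import Mathlib
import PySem

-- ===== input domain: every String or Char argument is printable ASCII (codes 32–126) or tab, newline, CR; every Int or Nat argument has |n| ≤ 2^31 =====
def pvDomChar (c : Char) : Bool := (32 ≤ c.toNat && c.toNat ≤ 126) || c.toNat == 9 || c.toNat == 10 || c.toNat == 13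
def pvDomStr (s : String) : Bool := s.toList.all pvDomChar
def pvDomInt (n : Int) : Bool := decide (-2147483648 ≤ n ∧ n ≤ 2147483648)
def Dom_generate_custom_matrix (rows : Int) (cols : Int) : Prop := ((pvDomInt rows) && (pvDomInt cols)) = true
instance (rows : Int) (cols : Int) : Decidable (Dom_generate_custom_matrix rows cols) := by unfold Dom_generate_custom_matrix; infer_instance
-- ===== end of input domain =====

-- B replaces A's serpentine mutation loop with a running counter by a closed-form per-cell value; objective: alternative (same asymptotic cost).

-- ===== PORT A =====
-- pvStepA is one write 'custom_matrix[j][i] = count; count += 1' of A's inner loops; pvColA one iteration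
-- of A's outer loop over columns i = cols-1 … 0 (j, i are always in range in Python, so modify/set hit a real cell)
def pvStepA (i : Int) (st : List (List Int) × Int) (j : Int) : List (List Int) × Int :=
  (st.1.modify j.toNat (fun row => row.set i.toNat st.2), st.2 + 1)

def pvColA (rows : Int) (st : List (List Int) × Int) (i : Int) : List (List Int) × Int :=
  if i % 2 == 0 then
    (PySem.List.pyRange (rows - 1) (-1) (-1)).foldl (pvStepA i) st
  else
    (PySem.List.pyRange 0 rows 1).foldl (pvStepA i) st

def generate_custom_matrix (rows : Int) (cols : Int) : List (List Int) :=
  ((PySem.List.pyRange (cols - 1) (-1) (-1)).foldl (pvColA rows)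
    (List.replicate rows.toNat (List.replicate cols.toNat (0 : Int)), 1)).1

-- ===== PORT B =====
def generate_custom_matrix_alt (rows : Int) (cols : Int) : List (List Int) :=
  (PySem.List.pyRange 0 rows 1).map (fun j =>
    (PySem.List.pyRange 0 cols 1).map (fun i =>
      (cols - 1 - i) * rows + 1 + (if i % 2 == 0 then rows - 1 - j else j)))

-- ===== PRECONDITION & SPEC =====
def Spec_generate_custom_matrix (rows : Int) (cols : Int) (out : List (List Int)) : Prop := out = generate_custom_matrix_alt rows cols
instance (rows : Int) (cols : Int) (out : List (List Int)) : Decidable (Spec_generate_custom_matrix rows cols out) := by unfold Spec_generate_custom_matrix; infer_instance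

-- ===== CLAIM (what is proved, stated in full; the proofs are below) =====
def Claim_equal_generate_custom_matrix : Prop := ∀ (rows : Int) (cols : Int), Dom_generate_custom_matrix rows cols → Spec_generate_custom_matrix rows cols (generate_custom_matrix rows cols)

-- ===== LEMMAS AND PROOFS =====
theorem pv_mapIdx_mapIdx {a b g1 : Type} (l : List a) (g : Nat -> a -> b) (f : Nat -> b -> g1) :
    (l.mapIdx g).mapIdx f = l.mapIdx (fun j x => f j (g j x)) := by
  induction l generalizing f g with
  | nil => simp
  | cons x t ih => simp [List.mapIdx_cons, ih]

theorem pv_mapIdx_id {a : Type} (l : List a) : l.mapIdx (fun _ x => x) = l := by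
  induction l with
  | nil => rfl
  | cons x t ih => simp [List.mapIdx_cons, ih]

theorem pv_mapIdx_congr {a b : Type} (l : List a) (f g : Nat -> a -> b)
    (h : forall j x, j < l.length -> f j x = g j x) : l.mapIdx f = l.mapIdx g := by
  induction l generalizing f g with
  | nil => simp
  | cons x t ih =>
    simp only [List.mapIdx_cons]
    rw [h 0 x (by simp), ih _ _ (fun j y hj => h (j+1) y (by simpa using Nat.succ_lt_succ hj))]

theorem pv_modify_append_middle (xs ys : List (List Int)) (y : List Int) (f : List Int → List Int) :
    (xs ++ y :: ys).modify xs.length f = xs ++ f y :: ys := by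
  induction xs with
  | nil => simp
  | cons a t ih => simpa using ih

theorem pv_foldl_set_append (v : Nat → Int) (l : List Nat) : ∀ (xs ys : List Int),
    (∀ i ∈ l, i < xs.length) →
    l.foldl (fun r i => r.set i (v i)) (xs ++ ys) = (l.foldl (fun r i => r.set i (v i)) xs) ++ ys := by
  induction l with
  | nil => intro xs ys _; rfl
  | cons a t ih =>
    intro xs ys h
    simp only [List.foldl_cons]
    rw [List.set_append, if_pos (h a (by simp))]
    exact ih _ _ (fun i hi => by rw [List.length_set]; exact h i (by simp [hi]))

theorem pv_setrow (C : Nat) (v : Nat → Int) :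
    ((List.range C).reverse).foldl (fun r i => r.set i (v i)) (List.replicate C (0 : Int))
      = (List.range C).map v := by
  induction C generalizing v with
  | zero => simp
  | succ n ih =>
    rw [List.range_succ, List.reverse_append, List.replicate_succ']
    simp only [List.reverse_cons, List.reverse_nil, List.nil_append, List.singleton_append, List.foldl_cons]
    rw [List.set_append, if_neg (by simp)]
    simp only [List.length_replicate, Nat.sub_self, List.set_cons_zero]
    rw [pv_foldl_set_append v _ _ _ (fun i hi => by simp at hi ⊢; omega), ih]
    simp [List.range_succ]

def pvStepN (iN : Nat) (st : List (List Int) × Int) (k : Nat) : List (List Int) × Int :=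
  (st.1.modify k (fun row => row.set iN st.2), st.2 + 1)

theorem pv_up (iN : Nat) (l : List (List Int)) : ∀ (pre : List (List Int)) (c : Int),
    (List.range' pre.length l.length).foldl (pvStepN iN) (pre ++ l, c)
      = (pre ++ l.mapIdx (fun j row => row.set iN (c + (j : Int))), c + l.length) := by
  induction l with
  | nil => intro pre c; simp
  | cons r t ih =>
    intro pre c
    simp only [List.length_cons, List.range'_succ, List.foldl_cons]
    have h1 : pvStepN iN (pre ++ r :: t, c) pre.length
        = (pre ++ r.set iN c :: t, c + 1) := by
      simp [pvStepN, pv_modify_append_middle]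
    rw [h1]
    have h2 : pre ++ r.set iN c :: t = (pre ++ [r.set iN c]) ++ t := by simp
    have h3 : pre.length + 1 = (pre ++ [r.set iN c]).length := by simp
    rw [h2, h3, ih]
    simp only [List.mapIdx_cons, List.append_assoc, List.singleton_append, Prod.mk.injEq,
      Nat.cast_zero, add_zero, Nat.cast_add, Nat.cast_one]
    refine ⟨?_, by ring⟩
    have hf : (fun (j : Nat) (row : List Int) => row.set iN (c + 1 + (j : Int)))
        = (fun (j : Nat) (row : List Int) => row.set iN (c + ((j : Int) + 1))) := by
      funext j row; congr 1; ring
    rw [hf]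

theorem pv_down (iN : Nat) (l : List (List Int)) : ∀ (post : List (List Int)) (c : Int),
    ((List.range l.length).foldl (fun st k => pvStepN iN st (l.length - 1 - k)) (l ++ post, c))
      = (l.mapIdx (fun j row => row.set iN (c + ((l.length - 1 - j : Nat) : Int))) ++ post, c + l.length) := by
  induction l using List.reverseRecOn with
  | nil => intro post c; simp
  | append_singleton xs r ih =>
    intro post c
    have hn : (xs ++ [r]).length = xs.length + 1 := by simp
    rw [hn, List.range_succ_eq_map, List.foldl_cons]
    have h1 : pvStepN iN (xs ++ [r] ++ post, c) (xs.length + 1 - 1 - 0)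
        = (xs ++ r.set iN c :: post, c + 1) := by
      simp only [Nat.add_sub_cancel, Nat.sub_zero, List.append_assoc, List.singleton_append]
      simp [pvStepN, pv_modify_append_middle]
    rw [h1, List.foldl_map]
    have h2 : (fun (st : List (List Int) × Int) (k : Nat) => pvStepN iN st (xs.length + 1 - 1 - k.succ))
        = (fun st k => pvStepN iN st (xs.length - 1 - k)) := by
      funext st k; congr 1; omega
    rw [h2, ih (r.set iN c :: post) (c + 1)]
    simp only [List.mapIdx_append, List.mapIdx_cons, List.mapIdx_nil, Prod.mk.injEq, List.append_assoc,
      List.singleton_append, Nat.add_sub_cancel, Nat.sub_self, Nat.cast_zero, add_zero, Nat.cast_add, Nat.cast_one]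
    refine ⟨?_, by ring⟩
    congr 1
    · apply pv_mapIdx_congr
      intro j x hj
      congr 1
      have : (xs.length - j : Nat) = (xs.length - 1 - j) + 1 := by omega
      rw [this]
      push_cast
      ring
    · norm_num

def pvOff (rows : Int) (i j : Nat) : Int :=
  if i % 2 = 0 then ((rows.toNat - 1 - j : Nat) : Int) else (j : Int)

theorem pv_col_char (rows : Int) (i : Int) (hi : 0 ≤ i) (m : List (List Int))
    (hm : m.length = rows.toNat) (c : Int) :
    pvColA rows (m, c) i
      = (m.mapIdx (fun j row => row.set i.toNat (c + pvOff rows i.toNat j)), c + rows.toNat) := by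
  have hcast : ((i.toNat : Int)) = i := Int.toNat_of_nonneg hi
  unfold pvColA
  by_cases h : i % 2 = 0
  · have hpar : i.toNat % 2 = 0 := by omega
    simp only [h, beq_self_eq_true, if_true]
    by_cases hr : rows ≤ 0
    · have hR : rows.toNat = 0 := by omega
      have hm0 : m = [] := List.eq_nil_of_length_eq_zero (by omega)
      rw [PySem.List.pyRange_neg_one_eq_nil (by omega)]
      simp [hm0, hR]
    · push_neg at hr
      rw [PySem.List.pyRange_neg_one, List.foldl_map]
      have hlen : (rows - 1 - (-1)).toNat = m.length := by omega
      rw [hlen]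
      have hcg : List.foldl (fun st (k : Nat) => pvStepA i st (rows - 1 - (k : Int))) (m, c)
            (List.range m.length)
          = List.foldl (fun st k => pvStepN i.toNat st (m.length - 1 - k)) (m, c)
            (List.range m.length) := by
        apply PySem.List.foldl_congr_mem
        intro acc k hk
        simp only [List.mem_range] at hk
        simp only [pvStepA, pvStepN]
        congr 2
        omega
      rw [hcg]
      have := pv_down i.toNat m [] c
      rw [List.append_nil] at this
      rw [this]
      simp only [List.append_nil, Prod.mk.injEq]
      refine ⟨?_, by rw [hm]⟩
      apply pv_mapIdx_congr
      intro j x _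
      simp [pvOff, hpar, hm]
  · have hpar : ¬ (i.toNat % 2 = 0) := by omega
    simp only [h, if_false, beq_iff_eq]
    by_cases hr : rows ≤ 0
    · have hR : rows.toNat = 0 := by omega
      have hm0 : m = [] := List.eq_nil_of_length_eq_zero (by omega)
      rw [PySem.List.pyRange_one_eq_nil (by omega)]
      simp [hm0, hR]
    · push_neg at hr
      rw [PySem.List.pyRange_one, List.foldl_map]
      have hlen : (rows - 0).toNat = m.length := by omega
      rw [hlen]
      have hfun : (fun (st : List (List Int) × Int) (k : Nat) => pvStepA i st (0 + (k : Int)))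
          = (fun st k => pvStepN i.toNat st k) := by
        funext st k
        simp only [pvStepA, pvStepN, zero_add, Int.toNat_natCast]
      rw [hfun]
      have := pv_up i.toNat m [] c
      simp only [List.length_nil, List.nil_append, ← List.range_eq_range'] at this
      rw [this]
      simp only [Prod.mk.injEq]
      refine ⟨?_, by rw [hm]⟩
      apply pv_mapIdx_congr
      intro j x _
      simp [pvOff, hpar]

def pvVal (rows : Int) (k : Nat) (c : Int) (i j : Nat) : Int :=
  c + (((k - 1 - i) * rows.toNat : Nat) : Int) + pvOff rows i j

theorem pv_outer (rows : Int) (k : Nat) : ∀ (m : List (List Int)) (c : Int),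
    m.length = rows.toNat →
    (PySem.List.pyRange ((k : Int) - 1) (-1) (-1)).foldl (pvColA rows) (m, c)
      = (m.mapIdx (fun j row =>
          ((List.range k).reverse).foldl (fun r i => r.set i (pvVal rows k c i j)) row),
         c + ((k * rows.toNat : Nat) : Int)) := by
  induction k with
  | zero =>
    intro m c hm
    rw [PySem.List.pyRange_neg_one_eq_nil (by norm_num)]
    simp [pv_mapIdx_id]
  | succ n ih =>
    intro m c hm
    have hc1 : ((n + 1 : Nat) : Int) - 1 = (n : Int) := by push_cast; ring
    rw [hc1, PySem.List.pyRange_neg_one_cons (by omega), List.foldl_cons]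
    have hcol := pv_col_char rows (n : Int) (by omega) m hm c
    rw [hcol, ih _ _ (by simp [hm])]
    simp only [Int.toNat_natCast]
    rw [pv_mapIdx_mapIdx]
    simp only [Prod.mk.injEq]
    constructor
    · apply pv_mapIdx_congr
      intro j x _
      rw [List.range_succ, List.reverse_append, List.reverse_cons, List.reverse_nil,
        List.nil_append, List.singleton_append, List.foldl_cons]
      have hv0 : pvVal rows (n + 1) c n j = c + pvOff rows n j := by
        have : n + 1 - 1 - n = 0 := by omega
        simp [pvVal, this]
      rw [hv0]
      apply PySem.List.foldl_congr_mem
      intro acc i hi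
      simp only [List.mem_reverse, List.mem_range] at hi
      congr 1
      have h1 : n + 1 - 1 - i = (n - 1 - i) + 1 := by omega
      simp only [pvVal, h1, Nat.succ_mul]
      push_cast
      ring
    · push_cast
      ring

theorem pv_main (rows cols : Int) :
    generate_custom_matrix rows cols = generate_custom_matrix_alt rows cols := by
  unfold generate_custom_matrix generate_custom_matrix_alt
  by_cases hc : cols < 0
  · rw [PySem.List.pyRange_neg_one_eq_nil (by omega),
      PySem.List.pyRange_one_eq_nil (le_of_lt hc)]
    have h0 : cols.toNat = 0 := by omega
    simp only [List.foldl_nil, h0, List.replicate_zero, List.map_nil]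
    rw [PySem.List.pyRange_one]
    simp only [List.map_map, Function.comp_def, List.map_const', List.length_range]
    congr 1
    omega
  · push_neg at hc
    have hcC : ((cols.toNat : Int)) = cols := Int.toNat_of_nonneg hc
    have hmain := pv_outer rows cols.toNat
      (List.replicate rows.toNat (List.replicate cols.toNat (0 : Int))) 1 (by simp)
    rw [hcC] at hmain
    rw [hmain]
    apply List.ext_getElem
    · simp [List.length_mapIdx, PySem.List.length_pyRange_one]
    · intro j h1 h2
      simp only [List.length_mapIdx, List.length_replicate] at h1
      have hrpos : 0 < rows := by omega
      have hrR : ((rows.toNat : Int)) = rows := by omega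
      rw [List.getElem_mapIdx, List.getElem_replicate, List.getElem_map,
        PySem.List.getElem_pyRange_one]
      rw [pv_setrow cols.toNat (fun i => pvVal rows cols.toNat 1 i j)]
      rw [PySem.List.pyRange_one, List.map_map]
      simp only [Int.sub_zero]
      apply List.map_congr_left
      intro i hi
      simp only [List.mem_range] at hi
      simp only [Function.comp]
      have e1 : ((cols.toNat - 1 - i : Nat) : Int) = cols - 1 - (i : Int) := by omega
      by_cases hp : i % 2 = 0
      · have hpi : ((0 + (i : Int)) % 2 == 0) = true := by
          simp only [beq_iff_eq]
          omega
        have e2 : ((rows.toNat - 1 - j : Nat) : Int) = rows - 1 - (j : Int) := by omega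
        simp only [pvVal, pvOff, hp, if_true, hpi, if_pos, e2]
        push_cast
        rw [e1, hrR]
        ring
      · have hpi : ((0 + (i : Int)) % 2 == 0) = false := by
          simp only [beq_iff_eq, beq_eq_false_iff_ne, ne_eq]
          omega
        simp only [pvVal, pvOff, hp, if_false, hpi, Bool.false_eq_true]
        push_cast
        rw [e1, hrR]
        ring

-- ===== VERDICT (by name: the statement is the Claim_ definition above) =====
theorem generate_custom_matrix_spec : Claim_equal_generate_custom_matrix := by
  intro rows cols _
  unfold Spec_generate_custom_matrix
  exact pv_main rows cols
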